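-- pv_equiv track=rewrite | github.com/Galaxy13/python-scripts | hse/python advanced (mod 1)/numerical_quiz.py | new_value
-- ===== SOURCE A (Python) =====
-- def new_value(number: str):
--     pointer1, pointer2 = 0, len(number) - 1
--     new_number = 0
--     while pointer1 < pointer2:
--         new_number += (int(number[pointer1]) - int(number[pointer2]))
--         pointer1 += 1
--         pointer2 -= 1
--     return new_number
-- ===== SOURCE B (Python) =====
-- def new_value(number: str):
--     half = len(number) // 2
--     left = sum(int(c) for c in number[:half])
--     right = sum(int(c) for c in number[len(number) - half:])
--     return left - right
-- ===== Notes on version B (the rewrite author's own statement) =====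
-- stated objective: simpler
-- what changed: Replaces the two-pointer paired-difference while-loop with two independent digit-sum passes over the left half and the right half (the odd-length middle digit lies in neither slice), returning left sum minus right sum.
import Mathlib
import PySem

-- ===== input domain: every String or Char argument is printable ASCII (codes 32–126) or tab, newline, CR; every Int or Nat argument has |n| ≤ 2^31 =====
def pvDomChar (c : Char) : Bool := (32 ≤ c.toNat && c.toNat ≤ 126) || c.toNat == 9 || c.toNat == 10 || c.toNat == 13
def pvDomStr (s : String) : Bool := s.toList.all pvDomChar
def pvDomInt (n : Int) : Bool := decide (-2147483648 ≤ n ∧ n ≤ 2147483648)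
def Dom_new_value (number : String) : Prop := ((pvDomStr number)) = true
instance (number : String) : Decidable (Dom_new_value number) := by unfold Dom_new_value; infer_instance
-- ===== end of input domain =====

-- B changes the decomposition only: two independent digit-sum passes over the two halves instead of A's two-pointer paired-difference loop; same O(n) cost. Pre_ excludes inputs where A raises ValueError.

-- int(number[i]) on a one-character string; total form, exact on digits (Pre_ guarantees
-- every scanned character is a digit, so the getD default is never the value used).
def pvDigit (c : Char) : Int := (PySem.Int.ofChars? [c]).getD 0

-- ===== PORT A =====
-- the while loop, step for step: state (pointer1, pointer2, new_number)
def pvLoopA (l : List Char) (p1 p2 acc : Int) : Int :=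
  if p1 < p2 then
    pvLoopA l (p1 + 1) (p2 - 1)
      (acc + (pvDigit ((PySem.List.pyGet? l p1).getD ' ') - pvDigit ((PySem.List.pyGet? l p2).getD ' ')))
  else acc
termination_by (p2 - p1).toNat
decreasing_by omega

def new_value (number : String) : Int :=
  pvLoopA number.toList 0 ((number.toList.length : Int) - 1) 0

-- ===== PORT B =====
def pvDigitSum (cs : List Char) : Int := (cs.map pvDigit).sum

def new_value_alt (number : String) : Int :=
  let l := number.toList
  let half := l.length / 2
  let left := pvDigitSum (PySem.List.slice l none (some (half : Int)))
  let right := pvDigitSum (PySem.List.slice l (some ((l.length - half : Nat) : Int)) none)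
  left - right

-- ===== PRECONDITION & SPEC =====
-- Pre_ excludes exactly the inputs where A raises ValueError: every character A's loop
-- reaches (the first ⌊n/2⌋ and the last ⌊n/2⌋; the odd-length middle char is never read)
-- must be a decimal digit.
def Pre_new_value (number : String) : Prop :=
  ((number.toList.take (number.toList.length / 2)).all PySem.Chars.isdigit
    && (number.toList.drop (number.toList.length - number.toList.length / 2)).all PySem.Chars.isdigit) = true
instance (number : String) : Decidable (Pre_new_value number) := by unfold Pre_new_value; infer_instance
def pvWitness_new_value : String := "1472"

def Spec_new_value (number : String) (out : Int) : Prop := out = new_value_alt number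
instance (number : String) (out : Int) : Decidable (Spec_new_value number out) := by unfold Spec_new_value; infer_instance

-- ===== CLAIM (what is proved, stated in full; the proofs are below) =====
def Claim_equal_new_value : Prop := ∀ (number : String), Dom_new_value number → Pre_new_value number → Spec_new_value number (new_value number)

-- ===== LEMMAS AND PROOFS =====

def pvD (l : List Char) (i : Nat) : Int := pvDigit (l.getD i ' ')

lemma pvLoopA_eq (l : List Char) (j : Nat) (hj : j ≤ l.length / 2) (acc : Int) :
    pvLoopA l (j : Int) ((l.length : Int) - 1 - j) acc
      = acc + ∑ i ∈ Finset.Ico j (l.length / 2), (pvD l i - pvD l (l.length - 1 - i)) := by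
  induction hn : l.length / 2 - j generalizing j acc with
  | zero =>
    have hj' : j = l.length / 2 := by omega
    rw [pvLoopA, if_neg (by omega)]
    simp [hj']
  | succ k ih =>
    have hlt : (j : Int) < (l.length : Int) - 1 - j := by omega
    rw [pvLoopA, if_pos hlt]
    have h2 : ((l.length : Int) - 1 - j) = (((l.length - 1 - j : Nat)) : Int) := by
      omega
    have hstep : pvLoopA l ((j : Int) + 1) ((l.length : Int) - 1 - j - 1)
        (acc + (pvDigit ((PySem.List.pyGet? l (j : Int)).getD ' ')
              - pvDigit ((PySem.List.pyGet? l ((l.length : Int) - 1 - j)).getD ' ')))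
        = (acc + (pvD l j - pvD l (l.length - 1 - j)))
          + ∑ i ∈ Finset.Ico (j+1) (l.length / 2), (pvD l i - pvD l (l.length - 1 - i)) := by
      have := ih (j + 1) (by omega) (acc + (pvD l j - pvD l (l.length - 1 - j))) (by omega)
      rw [show ((j : Int) + 1) = (((j+1 : Nat)) : Int) by push_cast; ring,
          show ((l.length : Int) - 1 - j - 1) = ((l.length : Int) - 1 - ((j+1 : Nat) : Int)) by push_cast; ring]
      rw [← this]
      congr 2
      · simp [h2, PySem.List.pyGet?_natCast, pvD, List.getD]
    rw [hstep]
    rw [show Finset.Ico j (l.length / 2) = Finset.Ico j (j+1) ∪ Finset.Ico (j+1) (l.length / 2) by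
          rw [Finset.Ico_union_Ico_eq_Ico] <;> omega,
        Finset.sum_union (by simp)]
    simp
    ring

lemma pvDigitSum_eq (cs : List Char) :
    pvDigitSum cs = ∑ i ∈ Finset.range cs.length, pvD cs i := by
  induction cs with
  | nil => simp [pvDigitSum]
  | cons c cs ih =>
    have h1 : ∀ i, pvD (c :: cs) (i + 1) = pvD cs i := by intro i; simp [pvD]
    have h0 : pvD (c :: cs) 0 = pvDigit c := by simp [pvD]
    rw [pvDigitSum, List.map_cons, List.sum_cons, ← pvDigitSum, ih,
        List.length_cons, Finset.sum_range_succ']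
    simp only [h1, h0]
    ring

-- ===== VERDICT (by name: the statement is the Claim_ definition above) =====
theorem new_value_spec : Claim_equal_new_value := by
  intro number _ _
  unfold Spec_new_value new_value new_value_alt
  generalize number.toList = l
  show pvLoopA l 0 ((l.length : Int) - 1) 0
      = pvDigitSum (PySem.List.slice l none (some ((l.length / 2 : Nat) : Int)))
        - pvDigitSum (PySem.List.slice l (some ((l.length - l.length / 2 : Nat) : Int)) none)
  rw [show (0 : Int) = ((0 : Nat) : Int) by simp,
      show ((l.length : Int) - 1) = ((l.length : Int) - 1 - ((0 : Nat) : Int)) by simp]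
  rw [pvLoopA_eq l 0 (by omega) (((0:Nat)):Int)]
  simp only [Nat.cast_zero, zero_add]
  rw [PySem.List.slice_to_natCast, PySem.List.slice_from_natCast]
  rw [pvDigitSum_eq, pvDigitSum_eq]
  have hlen_take : (l.take (l.length / 2)).length = l.length / 2 := by
    rw [List.length_take]; omega
  have hlen_drop : (l.drop (l.length - l.length / 2)).length = l.length / 2 := by
    rw [List.length_drop]; omega
  rw [hlen_take, hlen_drop]
  have htake : ∀ i ∈ Finset.range (l.length / 2), pvD (l.take (l.length / 2)) i = pvD l i := by
    intro i hi
    simp only [Finset.mem_range] at hi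
    simp [pvD, List.getD, hi]
  have hdrop : ∀ i ∈ Finset.range (l.length / 2),
      pvD (l.drop (l.length - l.length / 2)) i = pvD l (l.length - l.length / 2 + i) := by
    intro i hi
    simp [pvD, List.getD, List.getElem?_drop]
  rw [Finset.sum_congr rfl htake, Finset.sum_congr rfl hdrop]
  rw [show Finset.Ico 0 (l.length / 2) = Finset.range (l.length / 2) by simp]
  rw [Finset.sum_sub_distrib]
  congr 1
  rw [← Finset.sum_range_reflect]
  apply Finset.sum_congr rfl
  intro i hi
  simp only [Finset.mem_range] at hi
  congr 1
  omega
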